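-- pv_equiv track=rewrite | github.com/msneto/crawler-to-md | crawler_to_md/export_manager.py | _strip_html_comments_from_line
-- ===== SOURCE A (Python) =====
-- def _strip_html_comments_from_line(line, in_comment):
--     processed = []
--     index = 0
--
--     while index < len(line):
--         if in_comment:
--             comment_end = line.find("-->", index)
--             if comment_end == -1:
--                 return "".join(processed), True
--             index = comment_end + 3
--             in_comment = False
--             continue
--
--         comment_start = line.find("<!--", index)
--         if comment_start == -1:
--             processed.append(line[index:])
--             break
--
--         processed.append(line[index:comment_start])
--         index = comment_start + 4
--         in_comment = True
--
--     return "".join(processed), in_comment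
-- ===== SOURCE B (Python) =====
-- def _strip_html_comments_from_line(line, in_comment):
--     # Single-pass DFA over the characters, tracking how much of "<!--" (outside)
--     # or "-->" (inside) has been matched, instead of repeated str.find/slices.
--     out = []
--     k = 0  # matched prefix length of the active delimiter
--     for ch in line:
--         if in_comment:
--             if k == 0:
--                 k = 1 if ch == '-' else 0
--             elif k == 1:
--                 k = 2 if ch == '-' else 0
--             else:  # k == 2, "--" seen
--                 if ch == '>':
--                     in_comment = False
--                     k = 0
--                 elif ch == '-':
--                     k = 2
--                 else:
--                     k = 0
--         else:
--             if ch == "<!--"[k]: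
--                 k += 1
--                 if k == 4:
--                     in_comment = True
--                     k = 0
--             else:
--                 out.append("<!--"[:k])
--                 if ch == '<':
--                     k = 1
--                 else:
--                     out.append(ch)
--                     k = 0
--     if not in_comment:
--         out.append("<!--"[:k])
--     return "".join(out), in_comment
-- ===== Notes on version B (the rewrite author's own statement) =====
-- stated objective: alternative
-- what changed: Replaces A's repeated str.find/slice scanning loop with a single left-to-right character automaton that tracks how much of the '<!--' or '-->' delimiter is currently matched, flushing a broken partial match literally.
import Mathlib
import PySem

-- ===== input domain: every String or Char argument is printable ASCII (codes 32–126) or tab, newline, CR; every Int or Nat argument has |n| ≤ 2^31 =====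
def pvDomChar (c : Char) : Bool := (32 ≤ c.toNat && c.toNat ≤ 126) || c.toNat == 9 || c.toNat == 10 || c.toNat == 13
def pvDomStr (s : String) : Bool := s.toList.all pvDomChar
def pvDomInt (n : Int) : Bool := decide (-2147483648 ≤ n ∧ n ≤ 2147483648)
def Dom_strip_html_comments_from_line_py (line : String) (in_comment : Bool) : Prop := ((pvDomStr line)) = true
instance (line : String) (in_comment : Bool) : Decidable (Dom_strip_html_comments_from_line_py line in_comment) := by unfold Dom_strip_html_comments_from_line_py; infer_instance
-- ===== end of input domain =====

-- B replaces A's repeated str.find/slicing scan by a single left-to-right character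
-- automaton with a partial-delimiter match counter (objective: alternative decomposition).

-- ===== PORT A =====
-- str.find(sub, index): A keeps an absolute index; the port keeps the suffix
-- line[index:] instead, and pvFindSub gives the offset of the first occurrence of
-- pat in that suffix (none = -1). This is exact for the nonempty patterns A uses.
def pvFindSub (pat : List Char) : List Char → Option Nat
  | [] => if pat.isPrefixOf ([] : List Char) then some 0 else none
  | c :: t => if pat.isPrefixOf (c :: t) then some 0 else (pvFindSub pat t).map (· + 1)

-- the while-loop of A: state = (remaining suffix, in_comment, processed pieces)
def pvStripLoop : List Char → Bool → List (List Char) → List (List Char) × Bool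
  | rest, in_c, acc =>
    match h : rest with
    | [] => (acc, in_c)
    | _ :: _ =>
      if in_c then
        match pvFindSub ['-', '-', '>'] rest with
        | none => (acc, true)
        | some p => pvStripLoop (rest.drop (p + 3)) false acc
      else
        match pvFindSub ['<', '!', '-', '-'] rest with
        | none => (acc ++ [rest], false)
        | some p => pvStripLoop (rest.drop (p + 4)) true (acc ++ [rest.take p])
  termination_by rest _ _ => rest.length

def strip_html_comments_from_line_py (line : String) (in_comment : Bool) : String × Bool :=
  let r := pvStripLoop line.toList in_comment []
  (String.mk r.1.flatten, r.2)

-- ===== PORT B =====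
-- one DFA step of Source B's loop; state = (output so far, in_comment, matched prefix length k)
def pvStepB (st : List Char × Bool × Nat) (ch : Char) : List Char × Bool × Nat :=
  match st with
  | (out, true, k) =>
    if k = 0 then (out, true, if ch = '-' then 1 else 0)
    else if k = 1 then (out, true, if ch = '-' then 2 else 0)
    else -- k = 2, "--" seen
      if ch = '>' then (out, false, 0)
      else if ch = '-' then (out, true, 2)
      else (out, true, 0)
  | (out, false, k) =>
    if ch = (['<', '!', '-', '-'].getD k ' ') then
      if k + 1 = 4 then (out, true, 0) else (out, false, k + 1)
    else
      let out' := out ++ ['<', '!', '-', '-'].take k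
      if ch = '<' then (out', false, 1) else (out' ++ [ch], false, 0)

def strip_html_comments_from_line_py_alt (line : String) (in_comment : Bool) : String × Bool :=
  let st := line.toList.foldl pvStepB ([], in_comment, 0)
  (String.mk (if st.2.1 then st.1 else st.1 ++ ['<', '!', '-', '-'].take st.2.2), st.2.1)

-- ===== PRECONDITION & SPEC =====
def Spec_strip_html_comments_from_line_py (line : String) (in_comment : Bool) (out : String × Bool) : Prop := out = strip_html_comments_from_line_py_alt line in_comment
instance (line : String) (in_comment : Bool) (out : String × Bool) : Decidable (Spec_strip_html_comments_from_line_py line in_comment out) := by unfold Spec_strip_html_comments_from_line_py; infer_instance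

-- ===== CLAIM (what is proved, stated in full; the proofs are below) =====
def Claim_equal_strip_html_comments_from_line_py : Prop := ∀ (line : String) (in_comment : Bool), Dom_strip_html_comments_from_line_py line in_comment → Spec_strip_html_comments_from_line_py line in_comment (strip_html_comments_from_line_py line in_comment)

-- ===== LEMMAS AND PROOFS =====

-- reference function: character-by-character by cases on delimiter prefixes
def pvR : List Char → Bool → List Char × Bool
  | [], b => ([], b)
  | c :: t, true =>
    if ['-', '-', '>'].isPrefixOf (c :: t) then pvR ((c :: t).drop 3) false
    else pvR t true
  | c :: t, false =>
    if ['<', '!', '-', '-'].isPrefixOf (c :: t) then pvR ((c :: t).drop 4) true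
    else
      let r := pvR t false
      (c :: r.1, r.2)
  termination_by s _ => s.length

theorem find3_none : ∀ s : List Char, pvFindSub ['-', '-', '>'] s = none → pvR s true = ([], true) := by
  intro s
  induction s with
  | nil => intro _; rw [pvR]
  | cons c t ih =>
    intro h
    rw [pvFindSub] at h
    by_cases hp : ['-', '-', '>'].isPrefixOf (c :: t)
    · simp [hp] at h
    · rw [if_neg hp] at h
      rw [pvR, if_neg hp]
      exact ih (by simpa using h)

theorem find3_some : ∀ (s : List Char) (p : Nat), pvFindSub ['-', '-', '>'] s = some p →
    pvR s true = pvR (s.drop (p + 3)) false := by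
  intro s
  induction s with
  | nil => intro p h; simp [pvFindSub, List.isPrefixOf] at h
  | cons c t ih =>
    intro p h
    rw [pvFindSub] at h
    by_cases hp : ['-', '-', '>'].isPrefixOf (c :: t)
    · rw [if_pos hp] at h
      obtain rfl : p = 0 := by simpa using h.symm
      rw [pvR, if_pos hp]
    · rw [if_neg hp] at h
      obtain ⟨q, hq, rfl⟩ := Option.map_eq_some_iff.mp h
      rw [pvR, if_neg hp]
      rw [ih q hq]
      congr 1

theorem find4_none : ∀ s : List Char, pvFindSub ['<', '!', '-', '-'] s = none → pvR s false = (s, false) := by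
  intro s
  induction s with
  | nil => intro _; rw [pvR]
  | cons c t ih =>
    intro h
    rw [pvFindSub] at h
    by_cases hp : ['<', '!', '-', '-'].isPrefixOf (c :: t)
    · simp [hp] at h
    · rw [if_neg hp] at h
      rw [pvR, if_neg hp]
      rw [ih (by simpa using h)]

theorem find4_some : ∀ (s : List Char) (p : Nat), pvFindSub ['<', '!', '-', '-'] s = some p →
    pvR s false = (s.take p ++ (pvR (s.drop (p + 4)) true).1, (pvR (s.drop (p + 4)) true).2) := by
  intro s
  induction s with
  | nil => intro p h; simp [pvFindSub, List.isPrefixOf] at h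
  | cons c t ih =>
    intro p h
    rw [pvFindSub] at h
    by_cases hp : ['<', '!', '-', '-'].isPrefixOf (c :: t)
    · rw [if_pos hp] at h
      obtain rfl : p = 0 := by simpa using h.symm
      rw [pvR, if_pos hp]
      simp
    · rw [if_neg hp] at h
      obtain ⟨q, hq, rfl⟩ := Option.map_eq_some_iff.mp h
      rw [pvR, if_neg hp]
      rw [ih q hq]
      have hd : (c :: t).drop (q + 1 + 4) = t.drop (q + 4) := by
        rw [show q + 1 + 4 = (q + 4) + 1 from by omega, List.drop_succ_cons]
      have ht : (c :: t).take (q + 1) = c :: t.take q := by simp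
      rw [hd, ht]
      simp

theorem loopA_eq_R (rest : List Char) (in_c : Bool) (acc : List (List Char)) :
    (pvStripLoop rest in_c acc).1.flatten = acc.flatten ++ (pvR rest in_c).1 ∧
    (pvStripLoop rest in_c acc).2 = (pvR rest in_c).2 := by
  match rest with
  | [] =>
    rw [pvStripLoop, pvR]; simp
  | c :: t =>
    rw [pvStripLoop]
    by_cases hic : in_c
    · subst hic
      simp only [if_pos rfl]
      match hf : pvFindSub ['-', '-', '>'] (c :: t) with
      | none =>
        rw [find3_none _ hf]; simp
      | some p =>
        rw [find3_some _ p hf]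
        have hlen : ((c :: t).drop (p + 3)).length < (c :: t).length := by
          simp [List.length_drop]
        exact loopA_eq_R ((c :: t).drop (p + 3)) false acc
    · simp only [hic]
      rw [Bool.not_eq_true] at hic
      subst hic
      simp only [if_neg (by simp : ¬ (false = true))]
      match hf : pvFindSub ['<', '!', '-', '-'] (c :: t) with
      | none =>
        rw [find4_none _ hf]; simp
      | some p =>
        rw [find4_some _ p hf]
        have hlen : ((c :: t).drop (p + 4)).length < (c :: t).length := by
          simp [List.length_drop]
        have ih := loopA_eq_R ((c :: t).drop (p + 4)) true (acc ++ [(c :: t).take p])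
        refine ⟨?_, ih.2⟩
        rw [ih.1]
        simp
  termination_by rest.length

theorem step_out {c : Char} (u : List Char) (h : ¬ ['<', '!', '-', '-'].isPrefixOf (c :: u)) :
    pvR (c :: u) false = (c :: (pvR u false).1, (pvR u false).2) := by
  rw [pvR, if_neg h]

theorem step_out_pos (u : List Char) : pvR ('<' :: '!' :: '-' :: '-' :: u) false = pvR u true := by
  rw [pvR, if_pos (by simp [List.isPrefixOf])]
  rfl

theorem step_in {c : Char} (u : List Char) (h : ¬ ['-', '-', '>'].isPrefixOf (c :: u)) :
    pvR (c :: u) true = pvR u true := by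
  rw [pvR, if_neg h]

theorem step_in_pos (u : List Char) : pvR ('-' :: '-' :: '>' :: u) true = pvR u false := by
  rw [pvR, if_pos (by simp [List.isPrefixOf])]
  rfl

-- one-step behaviour of pvStepB (all cases of the automaton)
theorem S_in0_m (a : List Char) : pvStepB (a, true, 0) '-' = (a, true, 1) := by simp [pvStepB]
theorem S_in0_o (a : List Char) {c : Char} (h : c ≠ '-') : pvStepB (a, true, 0) c = (a, true, 0) := by
  simp [pvStepB, h]
theorem S_in1_m (a : List Char) : pvStepB (a, true, 1) '-' = (a, true, 2) := by simp [pvStepB]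
theorem S_in1_o (a : List Char) {c : Char} (h : c ≠ '-') : pvStepB (a, true, 1) c = (a, true, 0) := by
  simp [pvStepB, h]
theorem S_in2_gt (a : List Char) : pvStepB (a, true, 2) '>' = (a, false, 0) := by simp [pvStepB]
theorem S_in2_m (a : List Char) : pvStepB (a, true, 2) '-' = (a, true, 2) := by simp [pvStepB]
theorem S_in2_o (a : List Char) {c : Char} (h1 : c ≠ '>') (h2 : c ≠ '-') :
    pvStepB (a, true, 2) c = (a, true, 0) := by simp [pvStepB, h1, h2]
theorem S_out0_m (a : List Char) : pvStepB (a, false, 0) '<' = (a, false, 1) := by simp [pvStepB]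
theorem S_out0_o (a : List Char) {c : Char} (h : c ≠ '<') :
    pvStepB (a, false, 0) c = (a ++ [c], false, 0) := by simp [pvStepB, h]
theorem S_out1_m (a : List Char) : pvStepB (a, false, 1) '!' = (a, false, 2) := by simp [pvStepB]
theorem S_out1_lt (a : List Char) : pvStepB (a, false, 1) '<' = (a ++ ['<'], false, 1) := by
  simp [pvStepB]
theorem S_out1_o (a : List Char) {c : Char} (h1 : c ≠ '!') (h2 : c ≠ '<') :
    pvStepB (a, false, 1) c = (a ++ ['<'] ++ [c], false, 0) := by simp [pvStepB, h1, h2]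
theorem S_out2_m (a : List Char) : pvStepB (a, false, 2) '-' = (a, false, 3) := by simp [pvStepB]
theorem S_out2_lt (a : List Char) : pvStepB (a, false, 2) '<' = (a ++ ['<', '!'], false, 1) := by
  simp [pvStepB]
theorem S_out2_o (a : List Char) {c : Char} (h1 : c ≠ '-') (h2 : c ≠ '<') :
    pvStepB (a, false, 2) c = (a ++ ['<', '!'] ++ [c], false, 0) := by simp [pvStepB, h1, h2]
theorem S_out3_m (a : List Char) : pvStepB (a, false, 3) '-' = (a, true, 0) := by simp [pvStepB]
theorem S_out3_lt (a : List Char) : pvStepB (a, false, 3) '<' = (a ++ ['<', '!', '-'], false, 1) := by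
  simp [pvStepB]
theorem S_out3_o (a : List Char) {c : Char} (h1 : c ≠ '-') (h2 : c ≠ '<') :
    pvStepB (a, false, 3) c = (a ++ ['<', '!', '-'] ++ [c], false, 0) := by simp [pvStepB, h1, h2]

def pvFin (st : List Char × Bool × Nat) : List Char × Bool :=
  ((if st.2.1 then st.1 else st.1 ++ ['<', '!', '-', '-'].take st.2.2), st.2.1)

-- the still-unmatched delimiter prefix buffered by DFA state (b, k)
def pvBuf (b : Bool) (k : Nat) : List Char :=
  if b then List.take k ['-', '-', '>'] else List.take k ['<', '!', '-', '-']

theorem foldB_eq_R (s : List Char) (b : Bool) (k : Nat) (acc : List Char)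
    (hk : k ≤ if b then 2 else 3) :
    pvFin (s.foldl pvStepB (acc, b, k)) =
    (acc ++ (pvR (pvBuf b k ++ s) b).1, (pvR (pvBuf b k ++ s) b).2) := by
  match s with
  | [] =>
    cases b with
    | true =>
      have hk2 : k ≤ 2 := by simpa using hk
      interval_cases k <;> simp [pvFin, pvBuf, List.foldl, pvR, List.isPrefixOf]
    | false =>
      have hk3 : k ≤ 3 := by simpa using hk
      interval_cases k <;> simp [pvFin, pvBuf, List.foldl, pvR, List.isPrefixOf]
  | c :: t =>
    rw [List.foldl_cons]
    cases b with
    | true =>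
      have hk2 : k ≤ 2 := by simpa using hk
      interval_cases k
      · by_cases hc : c = '-'
        · subst hc
          rw [S_in0_m, foldB_eq_R t true 1 acc (by norm_num)]
          rfl
        · rw [S_in0_o acc hc, foldB_eq_R t true 0 acc (by norm_num)]
          rw [(show pvBuf true 0 ++ t = t from rfl), (show pvBuf true 0 ++ c :: t = c :: t from rfl),
            step_in t (by simp [List.isPrefixOf, Ne.symm hc])]
      · by_cases hc : c = '-'
        · subst hc
          rw [S_in1_m, foldB_eq_R t true 2 acc (by norm_num)]
          rfl
        · rw [S_in1_o acc hc, foldB_eq_R t true 0 acc (by norm_num)]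
          rw [(show pvBuf true 0 ++ t = t from rfl),
            (show pvBuf true 1 ++ c :: t = '-' :: c :: t from rfl),
            step_in (c :: t) (by simp [List.isPrefixOf, Ne.symm hc]),
            step_in t (by simp [List.isPrefixOf, Ne.symm hc])]
      · by_cases hgt : c = '>'
        · subst hgt
          rw [S_in2_gt, foldB_eq_R t false 0 acc (by norm_num)]
          rw [(show pvBuf false 0 ++ t = t from rfl),
            (show pvBuf true 2 ++ '>' :: t = '-' :: '-' :: '>' :: t from rfl),
            step_in_pos t]
        · by_cases hc : c = '-'
          · subst hc
            rw [S_in2_m, foldB_eq_R t true 2 acc (by norm_num)]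
            rw [(show pvBuf true 2 ++ '-' :: t = '-' :: ('-' :: '-' :: t) from rfl),
              (show pvBuf true 2 ++ t = '-' :: '-' :: t from rfl),
              step_in ('-' :: '-' :: t) (by simp [List.isPrefixOf])]
          · rw [S_in2_o acc hgt hc, foldB_eq_R t true 0 acc (by norm_num)]
            rw [(show pvBuf true 0 ++ t = t from rfl),
              (show pvBuf true 2 ++ c :: t = '-' :: '-' :: c :: t from rfl),
              step_in ('-' :: c :: t) (by simp [List.isPrefixOf, Ne.symm hgt]),
              step_in (c :: t) (by simp [List.isPrefixOf, Ne.symm hc]),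
              step_in t (by simp [List.isPrefixOf, Ne.symm hc])]
    | false =>
      have hk3 : k ≤ 3 := by simpa using hk
      interval_cases k
      · by_cases hc : c = '<'
        · subst hc
          rw [S_out0_m, foldB_eq_R t false 1 acc (by norm_num)]
          rfl
        · rw [S_out0_o acc hc, foldB_eq_R t false 0 (acc ++ [c]) (by norm_num)]
          rw [(show pvBuf false 0 ++ t = t from rfl), (show pvBuf false 0 ++ c :: t = c :: t from rfl),
            step_out t (by simp [List.isPrefixOf, Ne.symm hc])]
          simp
      · by_cases hc : c = '!'
        · subst hc
          rw [S_out1_m, foldB_eq_R t false 2 acc (by norm_num)]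
          rfl
        · by_cases hlt : c = '<'
          · subst hlt
            rw [S_out1_lt, foldB_eq_R t false 1 (acc ++ ['<']) (by norm_num)]
            rw [(show pvBuf false 1 ++ t = '<' :: t from rfl),
              (show pvBuf false 1 ++ '<' :: t = '<' :: ('<' :: t) from rfl),
              step_out ('<' :: t) (by simp [List.isPrefixOf, Ne.symm hc])]
            simp
          · rw [S_out1_o acc hc hlt, foldB_eq_R t false 0 (acc ++ ['<'] ++ [c]) (by norm_num)]
            rw [(show pvBuf false 0 ++ t = t from rfl),
              (show pvBuf false 1 ++ c :: t = '<' :: (c :: t) from rfl),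
              step_out (c :: t) (by simp [List.isPrefixOf, Ne.symm hc]),
              step_out t (by simp [List.isPrefixOf, Ne.symm hlt])]
            simp
      · by_cases hc : c = '-'
        · subst hc
          rw [S_out2_m, foldB_eq_R t false 3 acc (by norm_num)]
          rfl
        · by_cases hlt : c = '<'
          · subst hlt
            rw [S_out2_lt, foldB_eq_R t false 1 (acc ++ ['<', '!']) (by norm_num)]
            rw [(show pvBuf false 1 ++ t = '<' :: t from rfl),
              (show pvBuf false 2 ++ '<' :: t = '<' :: ('!' :: '<' :: t) from rfl),
              step_out ('!' :: '<' :: t) (by simp [List.isPrefixOf, Ne.symm hc]),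
              step_out ('<' :: t) (by simp [List.isPrefixOf])]
            simp
          · rw [S_out2_o acc hc hlt, foldB_eq_R t false 0 (acc ++ ['<', '!'] ++ [c]) (by norm_num)]
            rw [(show pvBuf false 0 ++ t = t from rfl),
              (show pvBuf false 2 ++ c :: t = '<' :: ('!' :: c :: t) from rfl),
              step_out ('!' :: c :: t) (by simp [List.isPrefixOf, Ne.symm hc]),
              step_out (c :: t) (by simp [List.isPrefixOf]),
              step_out t (by simp [List.isPrefixOf, Ne.symm hlt])]
            simp
      · by_cases hc : c = '-'
        · subst hc
          rw [S_out3_m, foldB_eq_R t true 0 acc (by norm_num)]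
          rw [(show pvBuf true 0 ++ t = t from rfl),
            (show pvBuf false 3 ++ '-' :: t = '<' :: '!' :: '-' :: '-' :: t from rfl),
            step_out_pos t]
        · by_cases hlt : c = '<'
          · subst hlt
            rw [S_out3_lt, foldB_eq_R t false 1 (acc ++ ['<', '!', '-']) (by norm_num)]
            rw [(show pvBuf false 1 ++ t = '<' :: t from rfl),
              (show pvBuf false 3 ++ '<' :: t = '<' :: ('!' :: '-' :: '<' :: t) from rfl),
              step_out ('!' :: '-' :: '<' :: t) (by simp [List.isPrefixOf]),
              step_out ('-' :: '<' :: t) (by simp [List.isPrefixOf]),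
              step_out ('<' :: t) (by simp [List.isPrefixOf])]
            simp
          · rw [S_out3_o acc hc hlt, foldB_eq_R t false 0 (acc ++ ['<', '!', '-'] ++ [c]) (by norm_num)]
            rw [(show pvBuf false 0 ++ t = t from rfl),
              (show pvBuf false 3 ++ c :: t = '<' :: ('!' :: '-' :: c :: t) from rfl),
              step_out ('!' :: '-' :: c :: t) (by simp [List.isPrefixOf, Ne.symm hc]),
              step_out ('-' :: c :: t) (by simp [List.isPrefixOf]),
              step_out (c :: t) (by simp [List.isPrefixOf]),
              step_out t (by simp [List.isPrefixOf, Ne.symm hlt])]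
            simp
  termination_by s.length
  decreasing_by all_goals simp

-- ===== VERDICT (by name: the statement is the Claim_ definition above) =====
theorem strip_html_comments_from_line_py_spec : Claim_equal_strip_html_comments_from_line_py := by
  intro line ic _
  unfold Spec_strip_html_comments_from_line_py
  unfold strip_html_comments_from_line_py strip_html_comments_from_line_py_alt
  dsimp only
  have hA := loopA_eq_R line.toList ic []
  have hB := foldB_eq_R line.toList ic 0 [] (by cases ic <;> norm_num)
  rw [(show pvBuf ic 0 ++ line.toList = line.toList from by cases ic <;> rfl)] at hB
  simp only [List.flatten_nil, List.nil_append] at hA hB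
  unfold pvFin at hB
  have h1 := congrArg Prod.fst hB
  have h2 := congrArg Prod.snd hB
  simp only [] at h1 h2
  rw [hA.1, hA.2, ← h2, ← h1]
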